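-- pv_equiv track=rewrite | github.com/altoidbox/advent-of-code | 2021/Day21/main.py | sim1
-- ===== SOURCE A (Python) =====
-- from collections import Counter
-- import itertools
--
-- POSSIBILITIES = Counter([sum(x) for x in itertools.product(list(range(1, 4)), repeat=3)])
--
-- ScoreMap = {}
--
-- WINNING_COUNTER = Counter({0: 1})
--
-- def sim1(pos, score):
--     if score >= 21:
--         # Base case - Once the score has reached 21, the game is over. 0 turns, 1 possibility
--         return WINNING_COUNTER
--     key = (pos, score)
--     # The answer never changes for a given position, just remember and return it
--     answer = ScoreMap.get(key, None)
--     if answer is not None: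
--         return answer
--     answer = Counter()
--     # For each possible roll
--     for roll, roll_count in POSSIBILITIES.items():
--         # calculate a new position
--         new_pos = (pos + roll - 1) % 10 + 1
--         # and a new score
--         new_score = score + new_pos
--         # For each possible outcome at that position and score
--         for win_turns, win_count in sim1(new_pos, new_score).items():
--             # calculate the number of instances we can get it from here (*roll_count)
--             # and increase the number of turns taken to win by 1
--             answer[win_turns + 1] += (win_count * roll_count)
--     ScoreMap[key] = answer
--     return answer
-- ===== SOURCE B (Python) =====
-- from collections import Counter
--
--
-- ROLLS = Counter(a + b + c for a in (1, 2, 3) for b in (1, 2, 3) for c in (1, 2, 3))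
--
--
-- def sim1(pos, score):
--     if score >= 21:
--         return Counter({0: 1})
--     dp = {}
--     for s in range(20, -1, -1):
--         for p in range(1, 11):
--             ans = Counter()
--             for roll, roll_count in ROLLS.items():
--                 new_pos = (p + roll - 1) % 10 + 1
--                 new_score = s + new_pos
--                 if new_score >= 21:
--                     ans[1] += roll_count
--                 else:
--                     for win_turns, win_count in dp[(new_pos, new_score)].items():
--                         ans[win_turns + 1] += win_count * roll_count
--             dp[(p, s)] = ans
--     return dp[(pos, score)]
-- ===== Notes on version B (the rewrite author's own statement) =====
-- stated objective: alternative
-- what changed: Replaces A's memoized top-down recursion (global ScoreMap cache, recursive Counter merging) with bottom-up dynamic programming: B fills a table dp[(p,s)] for all positions 1..10 and scores 20..0 in two nested loops and answers by a single lookup, preserving the exact Counter item order.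
-- outside the precondition, e.g. on sim1(11, 5): A returns {3: 11967, 4: 147869, 5: 559123, 6: 283029, 7: 9801, 2: 54}, B raises KeyError
import Mathlib
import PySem

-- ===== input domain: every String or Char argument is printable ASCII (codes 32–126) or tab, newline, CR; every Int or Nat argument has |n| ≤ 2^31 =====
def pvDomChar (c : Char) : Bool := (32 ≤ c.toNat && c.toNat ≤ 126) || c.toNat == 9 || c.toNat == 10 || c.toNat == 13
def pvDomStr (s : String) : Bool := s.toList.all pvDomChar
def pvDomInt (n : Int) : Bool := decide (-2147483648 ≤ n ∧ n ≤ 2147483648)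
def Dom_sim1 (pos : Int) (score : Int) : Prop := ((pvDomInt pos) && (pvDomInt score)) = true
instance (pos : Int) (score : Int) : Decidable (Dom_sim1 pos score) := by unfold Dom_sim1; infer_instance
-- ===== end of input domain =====

-- B replaces A's memoized top-down recursion (global ScoreMap) by bottom-up tabulation over
-- all (position, score) game states; same values and same Counter item order ("alternative").
-- A caches and returns shared global Counter objects; the equivalence is about the RETURN VALUE.

-- ===== PORT A =====
-- POSSIBILITIES = Counter([sum(x) for x in itertools.product(range(1,4), repeat=3)])
def possibilities : PySem.Dict Int Int :=
  PySem.Dict.counter ((PySem.List.pyRange 1 4 1).flatMap (fun a =>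
    (PySem.List.pyRange 1 4 1).flatMap (fun b =>
      (PySem.List.pyRange 1 4 1).map (fun c => a + b + c))))

-- A's recursion with the global ScoreMap memo threaded through explicitly; the dict values are
-- the returned Counters' item lists.  The fuel only bounds the recursion depth: every recursive
-- call strictly increases score, so fuel (21 - score).toNat suffices and 0-fuel is unreachable.
def sim1Go : Nat → Int → Int → PySem.Dict (Int × Int) (List (Int × Int)) →
    (List (Int × Int)) × PySem.Dict (Int × Int) (List (Int × Int))
  | 0, _, score, memo => if 21 ≤ score then ([(0, 1)], memo) else ([], memo)
  | fuel + 1, pos, score, memo =>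
    if 21 ≤ score then ([(0, 1)], memo)
    else
      match memo.get? (pos, score) with
      | some a => (a, memo)
      | none =>
        let res := possibilities.items.foldl
          (fun (acc : PySem.Dict Int Int × PySem.Dict (Int × Int) (List (Int × Int))) rc =>
            let newPos := PySem.Int.mod (pos + rc.1 - 1) 10 + 1
            let sub := sim1Go fuel newPos (score + newPos) acc.2
            (sub.1.foldl (fun ans wt => ans.modify (wt.1 + 1) 0 (· + wt.2 * rc.2)) acc.1,
             sub.2))
          (PySem.Dict.empty, memo)
        (res.1.items, res.2.insert (pos, score) res.1.items)

def sim1 (pos : Int) (score : Int) : List (Int × Int) :=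
  (sim1Go (21 - score).toNat pos score PySem.Dict.empty).1

-- ===== PORT B =====
-- ROLLS = Counter(a+b+c for a in (1,2,3) for b in (1,2,3) for c in (1,2,3))
def rollsAlt : PySem.Dict Int Int :=
  PySem.Dict.counter (([1, 2, 3] : List Int).flatMap (fun a =>
    ([1, 2, 3] : List Int).flatMap (fun b =>
      ([1, 2, 3] : List Int).map (fun c => a + b + c))))

-- bottom-up table dp[(p,s)] for s = 20 .. 0, p = 1 .. 10; final lookup dp[(pos, score)]
-- (a KeyError in Python outside the table, which is outside Pre_; getD is exact inside it).
def sim1_alt (pos : Int) (score : Int) : List (Int × Int) :=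
  if 21 ≤ score then [(0, 1)]
  else
    let dp := (PySem.List.pyRange 20 (-1) (-1)).foldl (fun dp s =>
      (PySem.List.pyRange 1 11 1).foldl (fun dp p =>
        let ans := rollsAlt.items.foldl (fun (ans : PySem.Dict Int Int) rc =>
          let newPos := PySem.Int.mod (p + rc.1 - 1) 10 + 1
          let newScore := s + newPos
          if 21 ≤ newScore then ans.modify 1 0 (· + rc.2)
          else (dp.getD (newPos, newScore) []).foldl
            (fun ans wt => ans.modify (wt.1 + 1) 0 (· + wt.2 * rc.2)) ans)
          PySem.Dict.empty
        dp.insert (p, s) ans.items) dp)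
      (PySem.Dict.empty : PySem.Dict (Int × Int) (List (Int × Int)))
    dp.getD (pos, score) []

-- ===== PRECONDITION & SPEC =====
-- Pre_ restricts score < 21 queries to the game's natural domain (board position 1..10,
-- nonnegative score): A also returns for out-of-range positions (its first roll normalizes
-- them mod 10) and for moderately negative scores, where B's table has no entry and B raises.
def Pre_sim1 (pos : Int) (score : Int) : Prop :=
  21 ≤ score ∨ (1 ≤ pos ∧ pos ≤ 10 ∧ 0 ≤ score)
instance (pos : Int) (score : Int) : Decidable (Pre_sim1 pos score) := by
  unfold Pre_sim1; infer_instance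

def pvWitness_sim1 : Int × Int := (4, 0)

def Spec_sim1 (pos : Int) (score : Int) (out : List (Int × Int)) : Prop := out = sim1_alt pos score
instance (pos : Int) (score : Int) (out : List (Int × Int)) : Decidable (Spec_sim1 pos score out) := by
  unfold Spec_sim1; infer_instance

-- ===== CLAIM (what is proved, stated in full; the proofs are below) =====
def Claim_equal_sim1 : Prop := ∀ (pos : Int) (score : Int), Dom_sim1 pos score → Pre_sim1 pos score → Spec_sim1 pos score (sim1 pos score)

-- ===== LEMMAS AND PROOFS =====

-- the common mathematical specification: the win-turn Counter of a state, fueled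
def fspec : Nat → Int → Int → List (Int × Int)
  | 0, _, score => if 21 ≤ score then [(0, 1)] else []
  | fuel + 1, pos, score =>
    if 21 ≤ score then [(0, 1)]
    else
      (possibilities.items.foldl (fun (ans : PySem.Dict Int Int) rc =>
        (fspec fuel (PySem.Int.mod (pos + rc.1 - 1) 10 + 1)
            (score + (PySem.Int.mod (pos + rc.1 - 1) 10 + 1))).foldl
          (fun ans wt => ans.modify (wt.1 + 1) 0 (· + wt.2 * rc.2)) ans)
        PySem.Dict.empty).items

def F (pos score : Int) : List (Int × Int) := fspec (21 - score).toNat pos score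

lemma np_bounds (x : Int) : 1 ≤ PySem.Int.mod x 10 + 1 ∧ PySem.Int.mod x 10 + 1 ≤ 10 := by
  have h1 := PySem.Int.mod_nonneg x (b := 10) (by norm_num)
  have h2 := PySem.Int.mod_lt x (b := 10) (by norm_num)
  omega

lemma fspec_of_ge (fuel : Nat) (pos score : Int) (h : 21 ≤ score) :
    fspec fuel pos score = [(0, 1)] := by
  cases fuel <;> simp [fspec, h]

lemma F_of_ge (pos score : Int) (h : 21 ≤ score) : F pos score = [(0, 1)] :=
  fspec_of_ge _ _ _ h

lemma fspec_fuel : ∀ (fuel fuel' : Nat) (pos score : Int),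
    (21 - score).toNat ≤ fuel → (21 - score).toNat ≤ fuel' →
    fspec fuel pos score = fspec fuel' pos score := by
  intro fuel
  induction fuel with
  | zero =>
    intro fuel' pos score h h'
    have hs : 21 ≤ score := by omega
    rw [fspec_of_ge _ _ _ hs, fspec_of_ge _ _ _ hs]
  | succ f IH =>
    intro fuel' pos score h h'
    by_cases hs : 21 ≤ score
    · rw [fspec_of_ge _ _ _ hs, fspec_of_ge _ _ _ hs]
    · obtain ⟨f2, rfl⟩ : ∃ f2, fuel' = f2 + 1 := ⟨fuel' - 1, by omega⟩
      simp only [fspec, if_neg hs]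
      have hfun : ∀ (ans : PySem.Dict Int Int) (rc : Int × Int),
          (fspec f (PySem.Int.mod (pos + rc.1 - 1) 10 + 1)
              (score + (PySem.Int.mod (pos + rc.1 - 1) 10 + 1))).foldl
            (fun ans wt => ans.modify (wt.1 + 1) 0 (· + wt.2 * rc.2)) ans =
          (fspec f2 (PySem.Int.mod (pos + rc.1 - 1) 10 + 1)
              (score + (PySem.Int.mod (pos + rc.1 - 1) 10 + 1))).foldl
            (fun ans wt => ans.modify (wt.1 + 1) 0 (· + wt.2 * rc.2)) ans := by
        intro ans rc
        have hb := np_bounds (pos + rc.1 - 1)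
        rw [IH f2 (PySem.Int.mod (pos + rc.1 - 1) 10 + 1)
          (score + (PySem.Int.mod (pos + rc.1 - 1) 10 + 1)) (by omega) (by omega)]
      rw [funext fun ans => funext fun rc => hfun ans rc]

-- F at an in-game state, unfolded one level with F itself in the recursive position
lemma F_of_lt (pos score : Int) (h : score < 21) :
    F pos score = (possibilities.items.foldl (fun (ans : PySem.Dict Int Int) rc =>
      (F (PySem.Int.mod (pos + rc.1 - 1) 10 + 1)
          (score + (PySem.Int.mod (pos + rc.1 - 1) 10 + 1))).foldl
        (fun ans wt => ans.modify (wt.1 + 1) 0 (· + wt.2 * rc.2)) ans)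
      PySem.Dict.empty).items := by
  have ht : (21 - score).toNat = ((21 - score).toNat - 1) + 1 := by omega
  rw [F, ht]
  simp only [fspec, if_neg (not_le.mpr h)]
  have hfun : ∀ (ans : PySem.Dict Int Int) (rc : Int × Int),
      (fspec ((21 - score).toNat - 1) (PySem.Int.mod (pos + rc.1 - 1) 10 + 1)
          (score + (PySem.Int.mod (pos + rc.1 - 1) 10 + 1))).foldl
        (fun ans wt => ans.modify (wt.1 + 1) 0 (· + wt.2 * rc.2)) ans =
      (F (PySem.Int.mod (pos + rc.1 - 1) 10 + 1)
          (score + (PySem.Int.mod (pos + rc.1 - 1) 10 + 1))).foldl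
        (fun ans wt => ans.modify (wt.1 + 1) 0 (· + wt.2 * rc.2)) ans := by
    intro ans rc
    have hb := np_bounds (pos + rc.1 - 1)
    rw [F, fspec_fuel ((21 - score).toNat - 1)
      ((21 - (score + (PySem.Int.mod (pos + rc.1 - 1) 10 + 1))).toNat)
      (PySem.Int.mod (pos + rc.1 - 1) 10 + 1)
      (score + (PySem.Int.mod (pos + rc.1 - 1) 10 + 1)) (by omega) (le_refl _)]
  rw [funext fun ans => funext fun rc => hfun ans rc]

-- ===== A-side: memoization correctness =====

def MemoOK (m : PySem.Dict (Int × Int) (List (Int × Int))) : Prop :=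
  ∀ p s v, m.get? (p, s) = some v → v = F p s

lemma sim1Go_of_ge (fuel : Nat) (pos score : Int) (m : PySem.Dict (Int × Int) (List (Int × Int)))
    (h : 21 ≤ score) : sim1Go fuel pos score m = ([(0, 1)], m) := by
  cases fuel <;> simp [sim1Go, h]

lemma sim1Go_correct : ∀ (fuel : Nat) (pos score : Int)
    (m : PySem.Dict (Int × Int) (List (Int × Int))),
    (21 - score).toNat ≤ fuel → MemoOK m →
    (sim1Go fuel pos score m).1 = F pos score ∧ MemoOK (sim1Go fuel pos score m).2 := by
  intro fuel
  induction fuel with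
  | zero =>
    intro pos score m h hm
    have hs : 21 ≤ score := by omega
    rw [sim1Go_of_ge _ _ _ _ hs]
    exact ⟨(F_of_ge pos score hs).symm, hm⟩
  | succ f IH =>
    intro pos score m h hm
    by_cases hs : 21 ≤ score
    · rw [sim1Go_of_ge _ _ _ _ hs]
      exact ⟨(F_of_ge pos score hs).symm, hm⟩
    · have hfold : ∀ (l : List (Int × Int)) (a : PySem.Dict Int Int)
          (m0 : PySem.Dict (Int × Int) (List (Int × Int))), MemoOK m0 →
          (l.foldl (fun (acc : PySem.Dict Int Int × PySem.Dict (Int × Int) (List (Int × Int))) rc =>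
            let newPos := PySem.Int.mod (pos + rc.1 - 1) 10 + 1
            let sub := sim1Go f newPos (score + newPos) acc.2
            (sub.1.foldl (fun ans wt => ans.modify (wt.1 + 1) 0 (· + wt.2 * rc.2)) acc.1,
             sub.2)) (a, m0)).1
          = l.foldl (fun (ans : PySem.Dict Int Int) rc =>
            (F (PySem.Int.mod (pos + rc.1 - 1) 10 + 1)
                (score + (PySem.Int.mod (pos + rc.1 - 1) 10 + 1))).foldl
              (fun ans wt => ans.modify (wt.1 + 1) 0 (· + wt.2 * rc.2)) ans) a
          ∧ MemoOK (l.foldl (fun (acc : PySem.Dict Int Int × PySem.Dict (Int × Int) (List (Int × Int))) rc =>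
            let newPos := PySem.Int.mod (pos + rc.1 - 1) 10 + 1
            let sub := sim1Go f newPos (score + newPos) acc.2
            (sub.1.foldl (fun ans wt => ans.modify (wt.1 + 1) 0 (· + wt.2 * rc.2)) acc.1,
             sub.2)) (a, m0)).2 := by
        intro l
        induction l with
        | nil => intro a m0 hm0; exact ⟨rfl, hm0⟩
        | cons rc l IHl =>
          intro a m0 hm0
          simp only [List.foldl_cons]
          have hb := np_bounds (pos + rc.1 - 1)
          obtain ⟨hsub1, hsub2⟩ := IH (PySem.Int.mod (pos + rc.1 - 1) 10 + 1)
            (score + (PySem.Int.mod (pos + rc.1 - 1) 10 + 1)) m0 (by omega) hm0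
          rw [hsub1]
          exact IHl _ _ hsub2
      rcases hget : m.get? (pos, score) with _ | a
      · simp only [sim1Go, if_neg hs, hget]
        obtain ⟨h1, h2⟩ := hfold possibilities.items PySem.Dict.empty m hm
        constructor
        · show (possibilities.items.foldl _ (PySem.Dict.empty, m)).1.items = F pos score
          rw [h1]
          exact (F_of_lt pos score (by omega)).symm
        · show MemoOK (((possibilities.items.foldl _ (PySem.Dict.empty, m)).2).insert
            (pos, score) (possibilities.items.foldl _ (PySem.Dict.empty, m)).1.items)
          intro p s v hv
          rw [PySem.Dict.get?_insert] at hv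
          split at hv
          · rename_i heq
            simp only [Prod.mk.injEq] at heq
            cases hv
            rw [h1, heq.1, heq.2]
            exact (F_of_lt pos score (by omega)).symm
          · exact h2 p s v hv
      · simp only [sim1Go, if_neg hs, hget]
        exact ⟨hm pos score a hget, hm⟩

-- ===== B-side: table correctness =====

def TableOK (dp : PySem.Dict (Int × Int) (List (Int × Int))) (t : Int) : Prop :=
  ∀ p s, 1 ≤ p → p ≤ 10 → t ≤ s → s ≤ 20 → dp.get? (p, s) = some (F p s)

lemma rolls_eq_poss : rollsAlt.items = possibilities.items := by decide

-- one cell of the table is the specification value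
lemma row_val (dp : PySem.Dict (Int × Int) (List (Int × Int))) (s p : Int)
    (h0 : 0 ≤ s) (h20 : s ≤ 20) (hP : TableOK dp (s + 1)) :
    (rollsAlt.items.foldl (fun (ans : PySem.Dict Int Int) rc =>
      let newPos := PySem.Int.mod (p + rc.1 - 1) 10 + 1
      let newScore := s + newPos
      if 21 ≤ newScore then ans.modify 1 0 (· + rc.2)
      else (dp.getD (newPos, newScore) []).foldl
        (fun ans wt => ans.modify (wt.1 + 1) 0 (· + wt.2 * rc.2)) ans)
      PySem.Dict.empty).items = F p s := by
  rw [F_of_lt p s (by omega), rolls_eq_poss]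
  have hfun : ∀ (ans : PySem.Dict Int Int) (rc : Int × Int),
      (let newPos := PySem.Int.mod (p + rc.1 - 1) 10 + 1
       let newScore := s + newPos
       if 21 ≤ newScore then ans.modify 1 0 (· + rc.2)
       else (dp.getD (newPos, newScore) []).foldl
         (fun ans wt => ans.modify (wt.1 + 1) 0 (· + wt.2 * rc.2)) ans) =
      (F (PySem.Int.mod (p + rc.1 - 1) 10 + 1)
          (s + (PySem.Int.mod (p + rc.1 - 1) 10 + 1))).foldl
        (fun ans wt => ans.modify (wt.1 + 1) 0 (· + wt.2 * rc.2)) ans := by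
    intro ans rc
    have hb := np_bounds (p + rc.1 - 1)
    show (if 21 ≤ s + (PySem.Int.mod (p + rc.1 - 1) 10 + 1) then ans.modify 1 0 (· + rc.2)
      else (dp.getD (PySem.Int.mod (p + rc.1 - 1) 10 + 1,
          s + (PySem.Int.mod (p + rc.1 - 1) 10 + 1)) []).foldl
        (fun ans wt => ans.modify (wt.1 + 1) 0 (· + wt.2 * rc.2)) ans) = _
    by_cases hge : 21 ≤ s + (PySem.Int.mod (p + rc.1 - 1) 10 + 1)
    · rw [if_pos hge, F_of_ge _ _ hge]
      simp
    · rw [if_neg hge]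
      have hkey := hP (PySem.Int.mod (p + rc.1 - 1) 10 + 1)
        (s + (PySem.Int.mod (p + rc.1 - 1) 10 + 1)) (by omega) (by omega) (by omega) (by omega)
      rw [PySem.Dict.getD_of_get?_eq_some dp [] hkey]
  rw [funext fun ans => funext fun rc => hfun ans rc]

lemma tableOK_insert_row (dp : PySem.Dict (Int × Int) (List (Int × Int))) (t s : Int)
    (hst : s < t) (k : Int) (v : List (Int × Int)) (hP : TableOK dp t) :
    TableOK (dp.insert (k, s) v) t := by
  intro p s' hp1 hp10 hts hs20
  rw [PySem.Dict.get?_insert]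
  split
  · rename_i heq
    exfalso
    simp only [Prod.mk.injEq] at heq
    omega
  · exact hP p s' hp1 hp10 hts hs20

def step2 (s : Int) (dp : PySem.Dict (Int × Int) (List (Int × Int))) (p : Int) :
    PySem.Dict (Int × Int) (List (Int × Int)) :=
  dp.insert (p, s) ((rollsAlt.items.foldl (fun (ans : PySem.Dict Int Int) rc =>
    let newPos := PySem.Int.mod (p + rc.1 - 1) 10 + 1
    let newScore := s + newPos
    if 21 ≤ newScore then ans.modify 1 0 (· + rc.2)
    else (dp.getD (newPos, newScore) []).foldl
      (fun ans wt => ans.modify (wt.1 + 1) 0 (· + wt.2 * rc.2)) ans)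
    PySem.Dict.empty).items)

lemma inner_fold : ∀ (l : List Int) (dp : PySem.Dict (Int × Int) (List (Int × Int))) (s : Int),
    0 ≤ s → s ≤ 20 → TableOK dp (s + 1) →
    TableOK (l.foldl (step2 s) dp) (s + 1) ∧
    ∀ p, (p ∈ l ∨ dp.get? (p, s) = some (F p s)) →
      (l.foldl (step2 s) dp).get? (p, s) = some (F p s) := by
  intro l
  induction l with
  | nil =>
    intro dp s h0 h20 hP
    refine ⟨hP, fun p hp => ?_⟩
    simpa using hp.resolve_left (by simp)
  | cons q l IHl =>
    intro dp s h0 h20 hP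
    have hq : step2 s dp q = dp.insert (q, s) (F q s) := by
      rw [step2, row_val dp s q h0 h20 hP]
    simp only [List.foldl_cons, hq]
    have hP1 : TableOK (dp.insert (q, s) (F q s)) (s + 1) :=
      tableOK_insert_row dp (s + 1) s (by omega) q (F q s) hP
    obtain ⟨hA, hB⟩ := IHl (dp.insert (q, s) (F q s)) s h0 h20 hP1
    refine ⟨hA, fun p hp => ?_⟩
    rcases hp with hp | hp
    · rcases List.mem_cons.mp hp with rfl | hp
      · exact hB p (Or.inr (by rw [PySem.Dict.get?_insert_self]))
      · exact hB p (Or.inl hp)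
    · apply hB p
      right
      rw [PySem.Dict.get?_insert]
      split
      · rename_i heq
        simp only [Prod.mk.injEq] at heq
        rw [heq.1]
      · exact hp

def step1 (dp : PySem.Dict (Int × Int) (List (Int × Int))) (s : Int) :
    PySem.Dict (Int × Int) (List (Int × Int)) :=
  (PySem.List.pyRange 1 11 1).foldl (step2 s) dp

lemma ps_eq : PySem.List.pyRange 1 11 1 = [1, 2, 3, 4, 5, 6, 7, 8, 9, 10] := by decide

lemma step1_correct (dp : PySem.Dict (Int × Int) (List (Int × Int))) (s : Int)
    (h0 : 0 ≤ s) (h20 : s ≤ 20) (hP : TableOK dp (s + 1)) : TableOK (step1 dp s) s := by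
  rw [step1, ps_eq]
  obtain ⟨h1, h2⟩ := inner_fold [1, 2, 3, 4, 5, 6, 7, 8, 9, 10] dp s h0 h20 hP
  intro p s' hp1 hp10 hss' hs20
  by_cases hs : s' = s
  · subst hs
    apply h2 p
    left
    have hcases : p = 1 ∨ p = 2 ∨ p = 3 ∨ p = 4 ∨ p = 5 ∨ p = 6 ∨ p = 7 ∨ p = 8 ∨ p = 9 ∨
        p = 10 := by omega
    rcases hcases with rfl | rfl | rfl | rfl | rfl | rfl | rfl | rfl | rfl | rfl <;> simp
  · exact h1 p s' hp1 hp10 (by omega) hs20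

def descList (n : Nat) : List Int := (List.range n).reverse.map (fun k => (k : Int))

lemma desc_eq : PySem.List.pyRange 20 (-1) (-1) = descList 21 := by decide

lemma desc_succ (n : Nat) : descList (n + 1) = (n : Int) :: descList n := by
  simp [descList, List.range_succ]

lemma outer_fold : ∀ (n : Nat) (dp : PySem.Dict (Int × Int) (List (Int × Int))),
    n ≤ 21 → TableOK dp (n : Int) → TableOK ((descList n).foldl step1 dp) 0 := by
  intro n
  induction n with
  | zero =>
    intro dp _ hP
    simpa [descList] using hP
  | succ n IHn =>
    intro dp hn hP
    rw [desc_succ]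
    simp only [List.foldl_cons]
    apply IHn (step1 dp (n : Int)) (by omega)
    apply step1_correct dp (n : Int) (by positivity) (by exact_mod_cast (by omega : n ≤ 20))
    intro p s hp1 hp10 hts hs20
    apply hP p s hp1 hp10 (by push_cast at hts ⊢; omega) hs20

lemma alt_eq (pos score : Int) (h : ¬ 21 ≤ score) :
    sim1_alt pos score =
      ((PySem.List.pyRange 20 (-1) (-1)).foldl step1 PySem.Dict.empty).getD (pos, score) [] := by
  rw [sim1_alt]
  simp only [if_neg h]
  rfl

-- ===== VERDICT (by name: the statement is the Claim_ definition above) =====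
theorem sim1_spec : Claim_equal_sim1 := by
  intro pos score _ hpre
  unfold Spec_sim1
  by_cases h21 : 21 ≤ score
  · rw [sim1, sim1Go_of_ge _ _ _ _ h21, sim1_alt]
    simp [h21]
  · rcases hpre with h | ⟨hp1, hp10, hs0⟩
    · exact absurd h h21
    · have hMemoE : MemoOK PySem.Dict.empty := by
        intro p s v hv
        simp [PySem.Dict.get?_empty] at hv
      have hA : sim1 pos score = F pos score :=
        (sim1Go_correct ((21 - score).toNat) pos score PySem.Dict.empty (le_refl _) hMemoE).1
      have hPE : TableOK PySem.Dict.empty ((21 : Nat) : Int) := by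
        intro p s _ _ hts hs20
        exfalso
        push_cast at hts
        omega
      have hTab := outer_fold 21 PySem.Dict.empty (le_refl _) hPE
      have hkey := hTab pos score hp1 hp10 hs0 (by omega)
      rw [hA, alt_eq pos score h21, desc_eq, PySem.Dict.getD_of_get?_eq_some _ [] hkey]
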